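-- pv_equiv track=rewrite | github.com/Jasonlee1995/LeetCode_Python | Solution/[2423][Easy] Remove Letter To Equalize Frequency.py | equalFrequency
-- ===== SOURCE A (Python) =====
-- import collections
--
-- def equalFrequency(word):
--     cnt = collections.Counter(word)
--     for k in set(word):
--         cnt[k] -= 1
--         if cnt[k] == 0: cnt.pop(k)
--         if len(set(cnt.values())) == 1: return True
--         cnt[k] = cnt.get(k, 0) + 1
--     return False
-- ===== SOURCE B (Python) =====
-- import collections
--
-- def equalFrequency(word):
--     # Case analysis on the frequency-of-frequencies table: no trial-removal loop.
--     freq = collections.Counter(word)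
--     fc = collections.Counter(freq.values())
--     ks = sorted(fc)
--     if len(ks) == 1:
--         f = ks[0]
--         n = fc[f]
--         return (n == 1 and f >= 2) or (n >= 2 and f == 1)
--     if len(ks) == 2:
--         lo, hi = ks
--         return (lo == 1 and fc[lo] == 1) or (hi == lo + 1 and fc[hi] == 1)
--     return False
-- ===== Notes on version B (the rewrite author's own statement) =====
-- stated objective: alternative
-- what changed: B replaces A's trial-removal loop (for each distinct letter: decrement the Counter, test whether the remaining values are all equal, restore) by a direct O(1) case analysis on the frequency-of-frequencies histogram (number of distinct counts and their multiplicities), with no trial loop and no dict mutation.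
import Mathlib
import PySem

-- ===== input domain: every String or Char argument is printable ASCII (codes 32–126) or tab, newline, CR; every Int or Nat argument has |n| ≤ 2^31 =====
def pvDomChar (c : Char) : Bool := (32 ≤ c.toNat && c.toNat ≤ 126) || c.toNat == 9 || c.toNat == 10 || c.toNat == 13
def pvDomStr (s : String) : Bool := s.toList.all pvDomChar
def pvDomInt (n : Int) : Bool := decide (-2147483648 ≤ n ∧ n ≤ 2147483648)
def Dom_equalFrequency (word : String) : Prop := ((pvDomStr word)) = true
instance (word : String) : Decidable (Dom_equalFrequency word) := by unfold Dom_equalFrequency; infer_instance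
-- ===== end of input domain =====

-- B replaces A's trial-removal loop by a direct case analysis on the frequency-of-frequencies
-- histogram (objective: alternative algorithm; the return values are proved identical).

-- ===== PORT A =====
-- A iterates over set(word); each iteration decrements the Counter at k (popping a zero entry),
-- tests len(set(cnt.values())) == 1, and restores the entry.  The True/False result does not
-- depend on the set's iteration order (proved below), so the set is consumed as its element list.
def eqFreqLoop (cnt : PySem.Dict Char Int) : List Char → Bool
  | [] => false
  | k :: rest =>
    let c1 := cnt.insert k (cnt.getD k 0 - 1)
    let c2 := if c1.getD k 0 == 0 then c1.erase k else c1
    if (PySem.Set.ofList c2.values).length == 1 then true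
    else eqFreqLoop (c2.insert k (c2.getD k 0 + 1)) rest

def equalFrequency (word : String) : Bool :=
  eqFreqLoop (PySem.Dict.counter word.toList) (PySem.Set.ofList word.toList)

-- ===== PORT B =====
def equalFrequency_alt (word : String) : Bool :=
  let freq := PySem.Dict.counter word.toList
  let fc := PySem.Dict.counter freq.values
  let ks := PySem.List.sorted fc.keys (fun x => x) false
  if ks.length == 1 then
    let f := PySem.List.pyGetD ks 0 0
    let n := fc.getD f 0
    (n == 1 && decide (2 ≤ f)) || (decide (2 ≤ n) && f == 1)
  else if ks.length == 2 then
    let lo := PySem.List.pyGetD ks 0 0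
    let hi := PySem.List.pyGetD ks 1 0
    (lo == 1 && fc.getD lo 0 == 1) || (hi == lo + 1 && fc.getD hi 0 == 1)
  else
    false

-- ===== PRECONDITION & SPEC =====
def Spec_equalFrequency (word : String) (out : Bool) : Prop := out = equalFrequency_alt word
instance (word : String) (out : Bool) : Decidable (Spec_equalFrequency word out) := by unfold Spec_equalFrequency; infer_instance

-- ===== CLAIM (what is proved, stated in full; the proofs are below) =====
def Claim_equal_equalFrequency : Prop := ∀ (word : String), Dom_equalFrequency word → Spec_equalFrequency word (equalFrequency word)

-- ===== LEMMAS AND PROOFS =====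

lemma bool_ext {a b : Bool} (h : a = true ↔ b = true) : a = b := by
  cases a <;> cases b <;> simp_all

-- distinct-count of an Int list, as a Finset cardinality
lemma dlen_card (l : List Int) : (PySem.Set.ofList l).length = l.toFinset.card := by
  have h2 : (PySem.Set.ofList l).toFinset = l.toFinset := by
    ext x; simp [List.mem_toFinset, PySem.Set.mem_ofList]
  rw [← h2, List.toFinset_card_of_nodup (PySem.Set.nodup_ofList l)]

lemma dlen_perm {l l' : List Int} (h : l.Perm l') :
    (PySem.Set.ofList l).length = (PySem.Set.ofList l').length := by
  rw [dlen_card, dlen_card, List.toFinset_eq_of_perm l l' h]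

-- facts about Dict.erase (not in the PySem book)
lemma get?_erase (d : PySem.Dict Char Int) (k j : Char) :
    (d.erase k).get? j = if j = k then none else d.get? j := by
  obtain ⟨items⟩ := d
  simp only [PySem.Dict.erase, PySem.Dict.get?]
  induction items with
  | nil => simp
  | cons p t ih =>
    by_cases hpk : p.1 = k
    · by_cases hjk : j = k
      · simp [hpk, hjk, List.find?_cons, ih] <;> simp_all
      · have hkj : (k == j) = false := by simp [Ne.symm hjk]
        simp only [List.filter_cons, hpk, List.find?_cons] at *
        simp [hkj, ih, hjk] <;> simp_all
    · by_cases hpj : p.1 = j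
      · by_cases hjk : j = k
        · exact absurd (hpj.trans hjk) hpk
        · simp [hpk, List.find?_cons, hpj, hjk]
      · by_cases hjk : j = k <;> simp [hpk, List.find?_cons, hpj, hjk, ih] <;> simp_all

lemma keys_erase (d : PySem.Dict Char Int) (k : Char) :
    (d.erase k).keys = d.keys.filter (fun x => !(x == k)) := by
  obtain ⟨items⟩ := d
  simp only [PySem.Dict.erase, PySem.Dict.keys]
  induction items with
  | nil => simp
  | cons p t ih => by_cases h : p.1 = k <;> simp [h, ih]

lemma getD_erase (d : PySem.Dict Char Int) (k j : Char) :
    (d.erase k).getD j 0 = if j = k then 0 else d.getD j 0 := by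
  simp only [PySem.Dict.getD, get?_erase]
  split <;> rfl

-- one loop-body test of A as a function of the current dict, and the dict transformations
def check1 (cnt : PySem.Dict Char Int) (k : Char) : Bool :=
  let c1 := cnt.insert k (cnt.getD k 0 - 1)
  let c2 := if c1.getD k 0 == 0 then c1.erase k else c1
  ((PySem.Set.ofList c2.values).length == 1)

def step2 (cnt : PySem.Dict Char Int) (k : Char) : PySem.Dict Char Int :=
  let c1 := cnt.insert k (cnt.getD k 0 - 1)
  if c1.getD k 0 == 0 then c1.erase k else c1

def restore (cnt : PySem.Dict Char Int) (k : Char) : PySem.Dict Char Int :=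
  (step2 cnt k).insert k ((step2 cnt k).getD k 0 + 1)

lemma eqFreqLoop_cons (cnt : PySem.Dict Char Int) (k : Char) (rest : List Char) :
    eqFreqLoop cnt (k :: rest) =
      if check1 cnt k then true else eqFreqLoop (restore cnt k) rest := by
  simp only [eqFreqLoop, check1, step2, restore]

lemma check1_eq (d : PySem.Dict Char Int) (k : Char) :
    check1 d k = ((PySem.Set.ofList (step2 d k).values).length == 1) := rfl

lemma getD_step2 (d : PySem.Dict Char Int) (k j : Char) :
    (step2 d k).getD j 0 =
      if j = k then (if d.getD k 0 - 1 = 0 then 0 else d.getD k 0 - 1) else d.getD j 0 := by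
  simp only [step2, PySem.Dict.getD_insert_self, beq_iff_eq]
  by_cases h0 : d.getD k 0 - 1 = 0
  · rw [if_pos h0, getD_erase]
    by_cases hjk : j = k <;> simp [hjk, h0, PySem.Dict.getD_insert]
  · rw [if_neg h0, PySem.Dict.getD_insert]
    by_cases hjk : j = k <;> simp [hjk, h0]

lemma keys_step2 (d : PySem.Dict Char Int) (k : Char) (hk : k ∈ d.keys) :
    (step2 d k).keys =
      if d.getD k 0 - 1 = 0 then d.keys.filter (fun x => !(x == k)) else d.keys := by
  have hc : d.contains k = true := (PySem.Dict.contains_iff_mem_keys d k).mpr hk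
  simp only [step2, PySem.Dict.getD_insert_self, beq_iff_eq]
  by_cases h0 : d.getD k 0 - 1 = 0 <;>
    simp [h0, keys_erase, PySem.Dict.keys_insert_of_contains d _ hc]

lemma nodup_keys_step2 (d : PySem.Dict Char Int) (k : Char) (hk : k ∈ d.keys)
    (hnd : d.keys.Nodup) : (step2 d k).keys.Nodup := by
  rw [keys_step2 d k hk]; split
  · exact hnd.filter _
  · exact hnd

lemma getD_restore (d : PySem.Dict Char Int) (k j : Char) :
    (restore d k).getD j 0 = d.getD j 0 := by
  simp only [restore, PySem.Dict.getD_insert, getD_step2]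
  by_cases hjk : j = k
  · subst hjk
    by_cases h0 : d.getD j 0 - 1 = 0 <;> simp [h0] <;> omega
  · simp [hjk]

lemma keys_restore_perm (d : PySem.Dict Char Int) (k : Char) (hk : k ∈ d.keys)
    (hnd : d.keys.Nodup) : (restore d k).keys.Perm d.keys := by
  simp only [restore]
  by_cases h0 : d.getD k 0 - 1 = 0
  · have hks : (step2 d k).keys = d.keys.filter (fun x => !(x == k)) := by
      rw [keys_step2 d k hk]; simp [h0]
    have hnmem : k ∉ (step2 d k).keys := by rw [hks]; simp
    have hcf : (step2 d k).contains k = false := by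
      rw [← Bool.not_eq_true]
      simp only [PySem.Dict.contains_iff_mem_keys]
      exact hnmem
    rw [PySem.Dict.keys_insert_of_not_contains _ _ hcf, hks]
    have h1 : d.keys.filter (fun x => !(x == k)) = d.keys.erase k := by
      rw [List.Nodup.erase_eq_filter hnd]
      simp [bne]
    have h2 : List.Perm (d.keys.filter (fun x => !(x == k)) ++ [k]) (k :: d.keys.erase k) := by
      rw [h1]; exact List.perm_append_singleton _ _
    exact h2.trans (List.perm_cons_erase hk).symm
  · have hks : (step2 d k).keys = d.keys := by rw [keys_step2 d k hk]; simp [h0]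
    have hc : (step2 d k).contains k = true := by
      rw [PySem.Dict.contains_iff_mem_keys, hks]; exact hk
    rw [PySem.Dict.keys_insert_of_contains _ _ hc, hks]

-- A's loop result depends on the dict only through its lookups and key multiset
lemma values_perm_of (d d' : PySem.Dict Char Int)
    (hg : ∀ j, d.getD j 0 = d'.getD j 0) (hp : d.keys.Perm d'.keys)
    (hnd : d.keys.Nodup) (hnd' : d'.keys.Nodup) : d.values.Perm d'.values := by
  rw [PySem.Dict.values_eq_map_keys d hnd 0, PySem.Dict.values_eq_map_keys d' hnd' 0]
  have hf : (fun j => d.getD j 0) = (fun j => d'.getD j 0) := funext hg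
  rw [hf]
  exact hp.map _

lemma check1_congr (d d' : PySem.Dict Char Int) (k : Char)
    (hg : ∀ j, d.getD j 0 = d'.getD j 0) (hp : d.keys.Perm d'.keys)
    (hnd : d.keys.Nodup) (hk : k ∈ d.keys) :
    check1 d k = check1 d' k := by
  have hnd' : d'.keys.Nodup := hp.nodup_iff.mp hnd
  have hk' : k ∈ d'.keys := hp.mem_iff.mp hk
  rw [check1_eq, check1_eq]
  have hvp : (step2 d k).values.Perm ((step2 d' k).values) := by
    apply values_perm_of
    · intro j; rw [getD_step2, getD_step2, hg j, hg k]
    · rw [keys_step2 d k hk, keys_step2 d' k hk', hg k]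
      split
      · exact hp.filter _
      · exact hp
    · exact nodup_keys_step2 d k hk hnd
    · exact nodup_keys_step2 d' k hk' hnd'
  rw [dlen_perm hvp]

lemma loop_congr (ks : List Char) (d d' : PySem.Dict Char Int)
    (hg : ∀ j, d.getD j 0 = d'.getD j 0) (hp : d.keys.Perm d'.keys)
    (hnd : d.keys.Nodup) (hks : ∀ k ∈ ks, k ∈ d.keys) :
    eqFreqLoop d ks = eqFreqLoop d' ks := by
  induction ks generalizing d d' with
  | nil => simp [eqFreqLoop]
  | cons k rest ih =>
    have hk : k ∈ d.keys := hks k (List.mem_cons_self ..)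
    have hnd' : d'.keys.Nodup := hp.nodup_iff.mp hnd
    have hk' : k ∈ d'.keys := hp.mem_iff.mp hk
    rw [eqFreqLoop_cons, eqFreqLoop_cons, check1_congr d d' k hg hp hnd hk]
    by_cases hc : check1 d' k = true
    · rw [if_pos hc, if_pos hc]
    · rw [if_neg hc, if_neg hc]
      apply ih
      · intro j; rw [getD_restore, getD_restore, hg j]
      · exact ((keys_restore_perm d k hk hnd).trans hp).trans
          (keys_restore_perm d' k hk' hnd').symm
      · exact ((keys_restore_perm d k hk hnd).nodup_iff).mpr hnd
      · intro j hj
        exact ((keys_restore_perm d k hk hnd).mem_iff).mpr (hks j (List.mem_cons_of_mem _ hj))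

lemma loop_any (ks : List Char) (d : PySem.Dict Char Int)
    (hnd : d.keys.Nodup) (hks : ∀ k ∈ ks, k ∈ d.keys) :
    eqFreqLoop d ks = ks.any (fun k => check1 d k) := by
  induction ks with
  | nil => simp [eqFreqLoop]
  | cons k rest ih =>
    have hk : k ∈ d.keys := hks k (List.mem_cons_self ..)
    rw [eqFreqLoop_cons]
    have hcong : eqFreqLoop (restore d k) rest = eqFreqLoop d rest := by
      apply loop_congr
      · intro j; rw [getD_restore]
      · exact keys_restore_perm d k hk hnd
      · exact ((keys_restore_perm d k hk hnd).nodup_iff).mpr hnd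
      · intro j hj
        exact ((keys_restore_perm d k hk hnd).mem_iff).mpr (hks j (List.mem_cons_of_mem _ hj))
    rw [hcong, ih (fun j hj => hks j (List.mem_cons_of_mem _ hj))]
    cases hc : check1 d k <;> simp [List.any_cons, hc]

-- the effect of one trial removal, purely on the multiset of letter counts
def okRemove (vs : List Int) (v : Int) : Bool :=
  ((PySem.Set.ofList (if v = 1 then vs.erase v else (v - 1) :: vs.erase v)).length == 1)

lemma check1_counter (cs : List Char) (k : Char) (hk : k ∈ cs) :
    check1 (PySem.Dict.counter cs) k =
      okRemove ((PySem.Set.ofList cs).map (fun c => (cs.count c : Int))) ((cs.count k : Int)) := by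
  set S := PySem.Set.ofList cs with hSdef
  set f : Char → Int := fun c => (cs.count c : Int) with hfdef
  set d := PySem.Dict.counter cs with hddef
  have hkS : k ∈ S := (PySem.Set.mem_ofList cs k).mpr hk
  have hndS : S.Nodup := PySem.Set.nodup_ofList cs
  have hkeys : k ∈ d.keys := by rw [hddef, PySem.Dict.keys_counter]; exact hkS
  have hnd : d.keys.Nodup := PySem.Dict.nodup_keys_counter cs
  have hv : d.getD k 0 = f k := PySem.Dict.getD_counter cs k
  have hgetD : ∀ j, d.getD j 0 = f j := fun j => PySem.Dict.getD_counter cs j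
  have hnd2 : (step2 d k).keys.Nodup := nodup_keys_step2 d k hkeys hnd
  have hvals : (step2 d k).values = (step2 d k).keys.map (fun j => (step2 d k).getD j 0) :=
    PySem.Dict.values_eq_map_keys _ hnd2 0
  have hfilter : S.filter (fun x => !(x == k)) = S.erase k := by
    rw [List.Nodup.erase_eq_filter hndS]; simp [bne]
  have hSperm : S.Perm (k :: S.erase k) := List.perm_cons_erase hkS
  have hvsperm : (S.map f).Perm (f k :: (S.erase k).map f) := hSperm.map f
  have hTperm : ((S.map f).erase (f k)).Perm ((S.erase k).map f) := by
    have := hvsperm.erase (f k)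
    rwa [List.erase_cons_head] at this
  have hcount1 : f k = 1 ↔ cs.count k = 1 := by simp only [hfdef]; omega
  rw [check1_eq, hvals]
  by_cases h1 : cs.count k = 1
  · have hc : d.getD k 0 - 1 = 0 := by rw [hv]; simp [hfdef, h1]
    have hkeys2 : (step2 d k).keys = S.erase k := by
      rw [keys_step2 d k hkeys, if_pos hc, hddef, PySem.Dict.keys_counter, ← hSdef, hfilter]
    rw [hkeys2]
    have hmap : (S.erase k).map (fun j => (step2 d k).getD j 0) = (S.erase k).map f := by
      apply List.map_congr_left
      intro j hj
      have hjk : j ≠ k := ((List.Nodup.mem_erase_iff hndS).mp hj).1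
      rw [getD_step2, if_neg hjk, hgetD]
    rw [hmap]
    have hok : okRemove (S.map f) (f k) =
        ((PySem.Set.ofList ((S.map f).erase (f k))).length == 1) := by
      rw [okRemove, if_pos (hcount1.mpr h1)]
    rw [hok, dlen_perm hTperm]
  · have hc : ¬ (d.getD k 0 - 1 = 0) := by
      rw [hv]; simp only [hfdef]
      intro hcon
      exact h1 (by exact_mod_cast (by omega : (cs.count k : Int) = 1))
    have hkeys2 : (step2 d k).keys = S := by
      rw [keys_step2 d k hkeys, if_neg hc, hddef, PySem.Dict.keys_counter]
    rw [hkeys2]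
    set g : Char → Int := fun j => (step2 d k).getD j 0 with hgdef
    have hfc : ¬ (f k - 1 = 0) := by rw [hv] at hc; exact hc
    have hgk : g k = f k - 1 := by simp [hgdef, getD_step2, hv, hfc]
    have hgj : ∀ j, j ≠ k → g j = f j := by
      intro j hj; rw [hgdef]; simp only [getD_step2, if_neg hj, hgetD]
    have hperm1 : (S.map g).Perm (g k :: (S.erase k).map g) := hSperm.map g
    have hmap2 : (S.erase k).map g = (S.erase k).map f := by
      apply List.map_congr_left
      intro j hj
      exact hgj j ((List.Nodup.mem_erase_iff hndS).mp hj).1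
    have hperm : (S.map g).Perm ((f k - 1) :: ((S.map f).erase (f k))) := by
      refine hperm1.trans ?_
      rw [hmap2, hgk]
      exact List.Perm.cons _ hTperm.symm
    have hok : okRemove (S.map f) (f k) =
        ((PySem.Set.ofList ((f k - 1) :: (S.map f).erase (f k))).length == 1) := by
      rw [okRemove, if_neg (fun hcon => h1 (hcount1.mp hcon))]
    rw [hok, dlen_perm hperm]

lemma equalFrequency_eq_any (word : String) :
    equalFrequency word =
      ((PySem.Set.ofList word.toList).map (fun c => (word.toList.count c : Int))).any
        (fun v => okRemove ((PySem.Set.ofList word.toList).map (fun c => (word.toList.count c : Int))) v) := by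
  rw [equalFrequency]
  rw [loop_any _ _ (PySem.Dict.nodup_keys_counter word.toList)
    (by rw [PySem.Dict.keys_counter]; exact fun k h => h)]
  rw [PySem.List.any_congr_mem
    (g := fun k => okRemove ((PySem.Set.ofList word.toList).map (fun c => (word.toList.count c : Int))) ((word.toList.count k : Int)))
    (fun k hkS => check1_counter word.toList k ((PySem.Set.mem_ofList _ _).mp hkS))]
  rw [List.any_map]
  rfl

-- toFinset of a one-element removal
lemma erase_toFinset_ge2 (vs : List Int) (v : Int) (h : 2 ≤ vs.count v) :
    (vs.erase v).toFinset = vs.toFinset := by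
  ext x
  simp only [List.mem_toFinset, ← List.count_pos_iff, List.count_erase]
  by_cases hx : x = v
  · subst hx; simp only [beq_self_eq_true, if_true]; omega
  · have hbx : (v == x) = false := by simp [Ne.symm hx]
    rw [hbx]; simp

lemma erase_toFinset_eq1 (vs : List Int) (v : Int) (h : vs.count v = 1) :
    (vs.erase v).toFinset = vs.toFinset.erase v := by
  ext x
  rw [Finset.mem_erase]
  simp only [List.mem_toFinset, ← List.count_pos_iff, List.count_erase]
  by_cases hx : x = v
  · subst hx; simp [h]
  · have hbx : (v == x) = false := by simp [Ne.symm hx]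
    rw [hbx]; simp [hx]

lemma okRemove_iff (vs : List Int) (v : Int) :
    okRemove vs v = true ↔
      (if v = 1 then vs.erase v else (v - 1) :: vs.erase v).toFinset.card = 1 := by
  rw [okRemove, dlen_card, beq_iff_eq]

-- exactly one distinct count f
lemma main_case1 (vs : List Int) (f : Int)
    (hpos : ∀ v ∈ vs, 1 ≤ v) (hmem : ∀ x, x ∈ vs ↔ x = f) (hf : f ∈ vs) :
    vs.any (okRemove vs) =
      (((vs.count f : Int) == 1 && decide (2 ≤ f)) || (decide (2 ≤ (vs.count f : Int)) && f == 1)) := by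
  have hf1 : 1 ≤ f := hpos f hf
  have hF : vs.toFinset = {f} := by ext x; simp [List.mem_toFinset, hmem]
  have hn1 : 1 ≤ vs.count f := List.count_pos_iff.mpr hf
  apply bool_ext
  rw [List.any_eq_true]
  constructor
  · rintro ⟨x, hx, hok⟩
    rw [(hmem x).mp hx] at hok
    rw [okRemove_iff] at hok
    by_cases hc : vs.count f = 1
    · by_cases hfe : f = 1
      · exfalso
        rw [if_pos hfe, hfe] at hok
        rw [erase_toFinset_eq1 vs 1 (hfe ▸ hc), hF, hfe] at hok
        simp at hok
      · simp only [Bool.or_eq_true, Bool.and_eq_true, beq_iff_eq, decide_eq_true_eq]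
        left; exact ⟨by omega, by omega⟩
    · by_cases hfe : f = 1
      · simp only [Bool.or_eq_true, Bool.and_eq_true, beq_iff_eq, decide_eq_true_eq]
        right; exact ⟨by omega, hfe⟩
      · exfalso
        rw [if_neg hfe, List.toFinset_cons, erase_toFinset_ge2 vs f (by omega), hF] at hok
        have : f - 1 ∉ ({f} : Finset Int) := by simp
        rw [Finset.card_insert_of_notMem this] at hok
        simp at hok
  · intro h
    refine ⟨f, hf, ?_⟩
    rw [okRemove_iff]
    simp only [beq_iff_eq, Bool.or_eq_true, Bool.and_eq_true, decide_eq_true_eq] at h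
    rcases h with ⟨hc, hf2⟩ | ⟨hc, hfe⟩
    · have hc' : vs.count f = 1 := by omega
      have hfe : ¬ (f = 1) := by omega
      rw [if_neg hfe, List.toFinset_cons, erase_toFinset_eq1 vs f hc', hF]
      simp
    · have hc' : 2 ≤ vs.count f := by omega
      rw [if_pos hfe, hfe, erase_toFinset_ge2 vs 1 (hfe ▸ hc'), hF, hfe]
      simp

-- exactly two distinct counts lo < hi
lemma main_case2 (vs : List Int) (lo hi : Int)
    (hpos : ∀ v ∈ vs, 1 ≤ v) (hlt : lo < hi)
    (hmem : ∀ x, x ∈ vs ↔ (x = lo ∨ x = hi)) (hlo : lo ∈ vs) (hhi : hi ∈ vs) :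
    vs.any (okRemove vs) =
      ((lo == 1 && (vs.count lo : Int) == 1) || (hi == lo + 1 && (vs.count hi : Int) == 1)) := by
  have hlo1 : 1 ≤ lo := hpos lo hlo
  have hne : lo ≠ hi := by omega
  have hF : vs.toFinset = {lo, hi} := by ext x; simp [List.mem_toFinset, hmem]
  have hclo : 1 ≤ vs.count lo := List.count_pos_iff.mpr hlo
  have hchi : 1 ≤ vs.count hi := List.count_pos_iff.mpr hhi
  have helo : vs.toFinset.erase lo = {hi} := by rw [hF]; ext x; simp; omega
  have hehi : vs.toFinset.erase hi = {lo} := by rw [hF]; ext x; simp; omega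
  have oklo : okRemove vs lo = true ↔ (lo = 1 ∧ vs.count lo = 1) := by
    rw [okRemove_iff]
    by_cases hl1 : lo = 1
    · by_cases hc : vs.count lo = 1
      · rw [if_pos hl1, erase_toFinset_eq1 vs lo hc, helo]
        constructor
        · intro _; exact ⟨hl1, hc⟩
        · intro _; simp
      · rw [if_pos hl1, erase_toFinset_ge2 vs lo (by omega), hF]
        constructor
        · intro h; exfalso; rw [Finset.card_insert_of_notMem (by simp [hne])] at h; simp at h
        · rintro ⟨-, hc'⟩; exact absurd hc' hc
    · by_cases hc : vs.count lo = 1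
      · rw [if_neg hl1, List.toFinset_cons, erase_toFinset_eq1 vs lo hc, helo]
        constructor
        · intro h; exfalso
          rw [Finset.card_insert_of_notMem (by simp; omega)] at h; simp at h
        · rintro ⟨hl', -⟩; exact absurd hl' hl1
      · rw [if_neg hl1, List.toFinset_cons, erase_toFinset_ge2 vs lo (by omega), hF]
        constructor
        · intro h; exfalso
          rw [Finset.card_insert_of_notMem (by simp; omega),
            Finset.card_insert_of_notMem (by simp [hne])] at h
          simp at h
        · rintro ⟨hl', -⟩; exact absurd hl' hl1
  have okhi : okRemove vs hi = true ↔ (hi = lo + 1 ∧ vs.count hi = 1) := by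
    rw [okRemove_iff, if_neg (by omega : ¬ hi = 1)]
    by_cases hc : vs.count hi = 1
    · rw [List.toFinset_cons, erase_toFinset_eq1 vs hi hc, hehi]
      by_cases hd : hi - 1 = lo
      · rw [show insert (hi - 1) ({lo} : Finset Int) = {lo} by rw [hd]; simp]
        simp [hc]; omega
      · constructor
        · intro h; exfalso
          rw [Finset.card_insert_of_notMem (by simp [hd])] at h; simp at h
        · rintro ⟨hh, -⟩; exact absurd (by omega : hi - 1 = lo) hd
    · rw [List.toFinset_cons, erase_toFinset_ge2 vs hi (by omega), hF]
      constructor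
      · intro h; exfalso
        have hsub : ({lo, hi} : Finset Int) ⊆ insert (hi - 1) {lo, hi} := Finset.subset_insert _ _
        have := Finset.card_le_card hsub
        rw [h, Finset.card_insert_of_notMem (by simp [hne]), Finset.card_singleton] at this
        omega
      · rintro ⟨-, hc'⟩; exact absurd hc' hc
  apply bool_ext
  rw [List.any_eq_true]
  simp only [Bool.or_eq_true, Bool.and_eq_true, beq_iff_eq]
  constructor
  · rintro ⟨x, hx, hok⟩
    rcases (hmem x).mp hx with rfl | rfl
    · rcases oklo.mp hok with ⟨h1, h2⟩
      left; exact ⟨h1, by omega⟩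
    · rcases okhi.mp hok with ⟨h1, h2⟩
      right; exact ⟨h1, by omega⟩
  · rintro (⟨h1, h2⟩ | ⟨h1, h2⟩)
    · exact ⟨lo, hlo, oklo.mpr ⟨h1, by omega⟩⟩
    · exact ⟨hi, hhi, okhi.mpr ⟨h1, by omega⟩⟩

-- three or more distinct counts: no single removal can equalize
lemma main_case3 (vs : List Int) (hcard : 3 ≤ vs.toFinset.card) :
    vs.any (okRemove vs) = false := by
  rw [List.any_eq_false]
  intro v hv
  have hsub : vs.toFinset.erase v ⊆
      (if v = 1 then vs.erase v else (v - 1) :: vs.erase v).toFinset := by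
    intro x hx
    rcases Finset.mem_erase.mp hx with ⟨hxv, hxm⟩
    have hxe : x ∈ vs.erase v := (List.mem_erase_of_ne hxv).mpr (List.mem_toFinset.mp hxm)
    split
    · exact List.mem_toFinset.mpr hxe
    · rw [List.toFinset_cons]; exact Finset.mem_insert_of_mem (List.mem_toFinset.mpr hxe)
  have hge : 2 ≤ (if v = 1 then vs.erase v else (v - 1) :: vs.erase v).toFinset.card := by
    have h1 := Finset.card_le_card hsub
    rw [Finset.card_erase_of_mem (List.mem_toFinset.mpr hv)] at h1
    omega
  intro hb
  exact absurd ((okRemove_iff vs v).mp hb) (by omega)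

lemma equalFrequency_eq_alt (word : String) : equalFrequency word = equalFrequency_alt word := by
  have hvals : (PySem.Dict.counter word.toList).values =
      (PySem.Set.ofList word.toList).map (fun c => (word.toList.count c : Int)) := by
    rw [PySem.Dict.values_eq_map_keys _ (PySem.Dict.nodup_keys_counter word.toList) 0,
      PySem.Dict.keys_counter]
    exact List.map_congr_left (fun c _ => PySem.Dict.getD_counter word.toList c)
  set vs : List Int := (PySem.Set.ofList word.toList).map (fun c => (word.toList.count c : Int)) with hvsdef
  have hpos : ∀ v ∈ vs, 1 ≤ v := by
    intro v hv
    rcases List.mem_map.mp hv with ⟨c, hc, rfl⟩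
    have : 0 < word.toList.count c :=
      List.count_pos_iff.mpr ((PySem.Set.mem_ofList _ _).mp hc)
    omega
  rw [equalFrequency_eq_any]
  show vs.any (okRemove vs) = equalFrequency_alt word
  have halt : equalFrequency_alt word =
      (let fc := PySem.Dict.counter vs
       let ks := PySem.List.sorted fc.keys (fun x => x) false
       if ks.length == 1 then
         let f := PySem.List.pyGetD ks 0 0
         let n := fc.getD f 0
         (n == 1 && decide (2 ≤ f)) || (decide (2 ≤ n) && f == 1)
       else if ks.length == 2 then
         let lo := PySem.List.pyGetD ks 0 0
         let hi := PySem.List.pyGetD ks 1 0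
         (lo == 1 && fc.getD lo 0 == 1) || (hi == lo + 1 && fc.getD hi 0 == 1)
       else false) := by
    rw [equalFrequency_alt]
    rw [hvals]
  rw [halt]
  simp only []
  obtain ⟨ks, hksdef⟩ : ∃ ks, PySem.List.sorted (PySem.Dict.counter vs).keys (fun x => x) false = ks := ⟨_, rfl⟩
  have hksmem : ∀ x, x ∈ ks ↔ x ∈ vs := by
    intro x
    rw [← hksdef, PySem.List.mem_sorted, PySem.Dict.keys_counter, PySem.Set.mem_ofList]
  have hkslt : ks.Pairwise (· < ·) := by
    rw [← hksdef, PySem.Dict.keys_counter]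
    exact PySem.List.sorted_ofList_pairwise_lt vs
  rw [hksdef]
  match ks, hksmem, hkslt with
  | [], hksmem, _ =>
    have hnil : vs = [] := List.eq_nil_iff_forall_not_mem.mpr (fun x hx => by
      simpa using (hksmem x).mpr hx)
    simp [hnil]
  | [a], hksmem, _ =>
    simp only [List.length_cons, List.length_nil]
    rw [if_pos (by decide)]
    have hga : PySem.List.pyGetD [a] 0 0 = a := PySem.List.pyGetD_zero_cons _ _ _
    rw [hga, PySem.Dict.getD_counter]
    exact main_case1 vs a hpos (fun x => by simpa using (hksmem x).symm) ((hksmem a).mp (by simp))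
  | [a, b], hksmem, hkslt =>
    simp only [List.length_cons, List.length_nil]
    rw [if_neg (by decide), if_pos (by decide)]
    have hga : PySem.List.pyGetD [a, b] 0 0 = a := PySem.List.pyGetD_zero_cons _ _ _
    have hgb : PySem.List.pyGetD [a, b] 1 0 = b := by simp [pysem]
    rw [hga, hgb, PySem.Dict.getD_counter, PySem.Dict.getD_counter]
    have hab : a < b := by
      have h := hkslt
      simp only [List.pairwise_cons, List.mem_singleton, List.mem_nil_iff] at h
      exact h.1 b rfl
    exact main_case2 vs a b hpos hab (fun x => by simpa using (hksmem x).symm)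
      ((hksmem a).mp (by simp)) ((hksmem b).mp (by simp))
  | a :: b :: c :: t, hksmem, hkslt =>
    simp only [List.length_cons]
    rw [if_neg (by simp), if_neg (by simp)]
    have hnd : (a :: b :: c :: t).Nodup := hkslt.imp (fun h => ne_of_lt h)
    have hsub : (a :: b :: c :: t).toFinset ⊆ vs.toFinset := by
      intro x hx
      exact List.mem_toFinset.mpr ((hksmem x).mp (List.mem_toFinset.mp hx))
    have hcard3 : 3 ≤ vs.toFinset.card := by
      have h1 := Finset.card_le_card hsub
      rw [List.toFinset_card_of_nodup hnd] at h1
      simp at h1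
      omega
    exact main_case3 vs hcard3

-- ===== VERDICT (by name: the statement is the Claim_ definition above) =====
theorem equalFrequency_spec : Claim_equal_equalFrequency := by
  intro word _
  unfold Spec_equalFrequency
  exact equalFrequency_eq_alt word
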